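-- pv_equiv track=rewrite | github.com/svyatoslavlipatov/FRW_bot | bot/frw_bot.py | add_buttons_to_markup
-- ===== SOURCE A (Python) =====
-- def add_buttons_to_markup(button_dict, max_buttons_per_row):
--     buttons = []
--     row = []
--     for btn_key, btn_text in button_dict.items():
--         row.append(btn_text)
--         if len(row) == max_buttons_per_row:
--             buttons.append(row)
--             row = []
--     if row:
--         buttons.append(row)
--     return buttons
-- ===== SOURCE B (Python) =====
-- def add_buttons_to_markup(button_dict, max_buttons_per_row):
--     vals = list(button_dict.values())
--     if max_buttons_per_row <= 0:
--         # no positive row limit: everything fits in one row (empty input -> no rows)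
--         return [vals] if vals else []
--     return [vals[i:i + max_buttons_per_row]
--             for i in range(0, len(vals), max_buttons_per_row)]
-- ===== Notes on version B (the rewrite author's own statement) =====
-- stated objective: simpler
-- what changed: B collects the dict values once and builds the rows by index slicing over range(0, len, step) instead of A's append-and-flush running-row accumulator; non-positive row size naturally means no limit (one row).
import Mathlib
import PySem

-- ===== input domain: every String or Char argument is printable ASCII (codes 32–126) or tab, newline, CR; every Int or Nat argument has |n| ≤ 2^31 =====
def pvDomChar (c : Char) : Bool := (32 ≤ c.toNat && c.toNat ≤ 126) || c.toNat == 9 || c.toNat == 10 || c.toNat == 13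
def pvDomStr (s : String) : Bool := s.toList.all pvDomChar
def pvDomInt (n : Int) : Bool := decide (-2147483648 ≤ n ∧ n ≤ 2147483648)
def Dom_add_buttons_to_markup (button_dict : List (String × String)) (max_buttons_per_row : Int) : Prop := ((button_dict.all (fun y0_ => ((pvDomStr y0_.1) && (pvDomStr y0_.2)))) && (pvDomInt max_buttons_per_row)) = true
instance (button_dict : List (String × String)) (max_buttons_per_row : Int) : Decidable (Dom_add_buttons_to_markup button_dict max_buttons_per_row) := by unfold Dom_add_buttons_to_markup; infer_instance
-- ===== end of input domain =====

-- B replaces A's append-and-flush running-row accumulator by collecting the values once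
-- and slicing them into rows by index (objective: simpler).


-- ===== PORT A =====
def add_buttons_to_markup (button_dict : List (String × String)) (max_buttons_per_row : Int) : List (List String) :=
  let st := button_dict.foldl
    (fun (st : List (List String) × List String) kv =>
      let row := st.2 ++ [kv.2]
      if (row.length : Int) = max_buttons_per_row then (st.1 ++ [row], []) else (st.1, row))
    ([], [])
  if st.2 = [] then st.1 else st.1 ++ [st.2]

-- ===== PORT B =====
def add_buttons_to_markup_alt (button_dict : List (String × String)) (max_buttons_per_row : Int) : List (List String) :=
  let vals := button_dict.map Prod.snd
  if max_buttons_per_row ≤ 0 then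
    if vals = [] then [] else [vals]
  else
    (PySem.List.pyRange 0 (vals.length : Int) max_buttons_per_row).map
      (fun i => PySem.List.slice vals (some i) (some (i + max_buttons_per_row)))

-- ===== PRECONDITION & SPEC =====
def Spec_add_buttons_to_markup (button_dict : List (String × String)) (max_buttons_per_row : Int) (out : List (List String)) : Prop := out = add_buttons_to_markup_alt button_dict max_buttons_per_row
instance (button_dict : List (String × String)) (max_buttons_per_row : Int) (out : List (List String)) : Decidable (Spec_add_buttons_to_markup button_dict max_buttons_per_row out) := by unfold Spec_add_buttons_to_markup; infer_instance

-- ===== CLAIM (what is proved, stated in full; the proofs are below) =====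
def Claim_equal_add_buttons_to_markup : Prop := ∀ (button_dict : List (String × String)) (max_buttons_per_row : Int), Dom_add_buttons_to_markup button_dict max_buttons_per_row → Spec_add_buttons_to_markup button_dict max_buttons_per_row (add_buttons_to_markup button_dict max_buttons_per_row)

-- ===== LEMMAS AND PROOFS =====

-- greedy chunking into rows of size c+1 (proof-only characterisation of both ports)
def pvChunks (c : Nat) : List String → List (List String)
  | [] => []
  | x :: xs => (x :: xs.take c) :: pvChunks c (xs.drop c)
termination_by l => l.length
decreasing_by simp only [List.length_cons, List.length_drop]; omega

-- A's fold step and finish, for stating the invariant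
def pvStep (m : Int) (st : List (List String) × List String) (t : String) : List (List String) × List String :=
  let row := st.2 ++ [t]
  if (row.length : Int) = m then (st.1 ++ [row], []) else (st.1, row)

def pvFinish (st : List (List String) × List String) : List (List String) :=
  if st.2 = [] then st.1 else st.1 ++ [st.2]

lemma pvChunks_short {c : Nat} {row : List String} (h : row.length ≤ c + 1) (hne : row ≠ []) :
    pvChunks c row = [row] := by
  cases row with
  | nil => exact absurd rfl hne
  | cons y ys =>
    simp only [pvChunks]
    have hl : ys.length ≤ c := by simpa using h
    rw [List.take_of_length_le hl, List.drop_of_length_le hl]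
    simp [pvChunks]

lemma pvChunks_full {c : Nat} {l vs : List String} (h : l.length = c + 1) :
    pvChunks c (l ++ vs) = l :: pvChunks c vs := by
  cases l with
  | nil => simp at h
  | cons y ys =>
    have hl : ys.length = c := by simpa using h
    simp only [List.cons_append, pvChunks]
    rw [← hl, List.take_left, List.drop_left]

lemma pvFoldl_noflush {m : Int} (hm : m ≤ 0) :
    ∀ (vals : List String) (buttons : List (List String)) (row : List String),
      vals.foldl (pvStep m) (buttons, row) = (buttons, row ++ vals) := by
  intro vals
  induction vals with
  | nil => intro buttons row; simp
  | cons t vs ih =>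
    intro buttons row
    have : ¬ (((row ++ [t]).length : Int) = m) := by
      have : (0:Int) < ((row ++ [t]).length : Int) := by
        simp
      omega
    simp only [List.foldl_cons, pvStep, if_neg this]
    rw [ih]
    simp

lemma pvFoldl_chunks {c : Nat} :
    ∀ (vals : List String) (buttons : List (List String)) (row : List String),
      row.length ≤ c →
      pvFinish (vals.foldl (pvStep ((c : Int) + 1)) (buttons, row)) =
        buttons ++ pvChunks c (row ++ vals) := by
  intro vals
  induction vals with
  | nil =>
    intro buttons row hr
    by_cases h : row = []
    · subst h; simp [pvFinish, pvChunks]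
    · simp only [List.foldl_nil, pvFinish, if_neg h, List.append_nil]
      rw [pvChunks_short (by omega) h]
  | cons t vs ih =>
    intro buttons row hr
    simp only [List.foldl_cons, pvStep]
    by_cases h : (((row ++ [t]).length : Int) = (c : Int) + 1)
    · have hlen : (row ++ [t]).length = c + 1 := by exact_mod_cast h
      simp only [if_pos h]
      rw [ih (buttons ++ [row ++ [t]]) [] (by simp)]
      rw [show row ++ t :: vs = (row ++ [t]) ++ vs by simp]
      rw [pvChunks_full hlen]
      simp
    · have hlen : (row ++ [t]).length ≤ c := by
        have h1 : (row ++ [t]).length ≤ c + 1 := by simp; omega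
        have h2 : (row ++ [t]).length ≠ c + 1 := by
          intro he; exact h (by exact_mod_cast congrArg (Nat.cast : Nat → Int) he)
        omega
      simp only [if_neg h]
      rw [ih buttons (row ++ [t]) hlen]
      simp

lemma pvRange_chunks {c : Nat} (hc : 0 < c) :
    ∀ (n : Nat) (vals : List String), vals.length = n →
      (List.range ((vals.length + c - 1) / c)).map
          (fun k => (vals.drop (c * k)).take c) = pvChunks (c - 1) vals := by
  intro n
  induction n using Nat.strong_induction_on with
  | _ n ih =>
  intro vals hn
  subst hn
  cases vals with
  | nil =>
    have : (List.length ([] : List String) + c - 1) / c = 0 := Nat.div_eq_of_lt (by simp only [List.length_nil]; omega)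
    simp [pvChunks]
    omega
  | cons x xs =>
    have hL : (x :: xs).length = xs.length + 1 := rfl
    have hsplit : ((x :: xs).length + c - 1) / c = ((((x :: xs).drop c).length + c - 1) / c) + 1 := by
      rw [List.length_drop]
      rcases Nat.lt_or_ge (xs.length + 1) c with hlt | hle
      · have h1 : ((x :: xs).length + c - 1) / c = 1 :=
          Nat.div_eq_of_lt_le (by simp only [hL]; omega) (by simp only [hL]; omega)
        have h2 : ((x :: xs).length - c + c - 1) / c = 0 := Nat.div_eq_of_lt (by simp only [hL]; omega)
        rw [h1, h2]
      · have : (x :: xs).length + c - 1 = ((x :: xs).length - c + c - 1) + c := by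
          simp only [hL]; omega
        rw [this, Nat.add_div_right _ hc]
    rw [hsplit, List.range_succ_eq_map, List.map_cons, List.map_map]
    have hhd : ((x :: xs).drop (c * 0)).take c = x :: xs.take (c - 1) := by
      have hcs : c = (c - 1) + 1 := by omega
      rw [Nat.mul_zero, List.drop_zero, hcs, List.take_succ_cons]
      simp
    have htl : ∀ k, ((x :: xs).drop (c * (k + 1))).take c = (((x :: xs).drop c).drop (c * k)).take c := by
      intro k
      rw [List.drop_drop]
      congr 2
      ring
    have hrec : (List.range ((((x :: xs).drop c).length + c - 1) / c)).map
        (fun k => (((x :: xs).drop c).drop (c * k)).take c) = pvChunks (c - 1) ((x :: xs).drop c) := by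
      exact ih (((x :: xs).drop c).length) (by rw [List.length_drop]; simp only [hL]; omega) _ rfl
    have hmap : (List.range ((((x :: xs).drop c).length + c - 1) / c)).map
          ((fun k => ((x :: xs).drop (c * k)).take c) ∘ (· + 1))
        = (List.range ((((x :: xs).drop c).length + c - 1) / c)).map
            (fun k => (((x :: xs).drop c).drop (c * k)).take c) := by
      apply List.map_congr_left
      intro k _
      exact htl k
    rw [hmap, hrec, hhd]
    have hdrop : (x :: xs).drop c = xs.drop (c - 1) := by
      have hcs : c = (c - 1) + 1 := by omega
      rw [hcs, List.drop_succ_cons]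
      simp
    rw [hdrop]
    simp [pvChunks]

lemma pvAlt_pos (vals : List String) {m : Int} (hm : 0 < m) :
    (PySem.List.pyRange 0 (vals.length : Int) m).map
        (fun i => PySem.List.slice vals (some i) (some (i + m))) =
      pvChunks (m.toNat - 1) vals := by
  lift m to Nat using hm.le with c
  have hc : 0 < c := by exact_mod_cast hm
  rw [PySem.List.pyRange_of_pos _ _ hm, List.map_map]
  have hidx : ∀ k ∈ List.range (if (0:Int) < (vals.length : Int) then (((vals.length : Int) - 0 + (c:Int) - 1) / (c:Int)).toNat else 0),
      ((fun i => PySem.List.slice vals (some i) (some (i + (c:Int)))) ∘ fun k : Nat => 0 + (c:Int) * (k : Int)) k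
      = (vals.drop (c * k)).take c := by
    intro k _
    simp only [Function.comp, zero_add]
    rw [PySem.List.slice_toNat vals (by positivity) (by positivity)]
    have h1 : ((c:Int) * (k : Int)).toNat = c * k := by
      rw [← Nat.cast_mul, Int.toNat_natCast]
    have h2 : ((c:Int) * (k : Int) + (c:Int)).toNat = c * k + c := by
      rw [← Nat.cast_mul, ← Nat.cast_add, Int.toNat_natCast]
    rw [h1, h2, Nat.add_sub_cancel_left]
  have hcnt : (if (0:Int) < (vals.length : Int) then (((vals.length : Int) - 0 + (c:Int) - 1) / (c:Int)).toNat else 0)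
      = (vals.length + c - 1) / c := by
    by_cases h : (0:Int) < (vals.length : Int)
    · rw [if_pos h]
      have hlen : 1 ≤ vals.length := by exact_mod_cast h
      have e1 : (vals.length : Int) - 0 + (c:Int) - 1 = ((vals.length + c - 1 : Nat) : Int) := by
        omega
      rw [e1, ← Int.natCast_ediv, Int.toNat_natCast]
    · rw [if_neg h]
      have h0 : vals.length = 0 := by omega
      rw [h0]
      exact (Nat.div_eq_of_lt (by omega)).symm
  rw [List.map_congr_left hidx, hcnt]
  have : ((c:Int)).toNat = c := Int.toNat_natCast c
  rw [this]
  exact pvRange_chunks hc vals.length vals rfl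

-- ===== VERDICT (by name: the statement is the Claim_ definition above) =====
theorem add_buttons_to_markup_spec : Claim_equal_add_buttons_to_markup := by
  intro bd m _
  unfold Spec_add_buttons_to_markup add_buttons_to_markup add_buttons_to_markup_alt
  have hfold : bd.foldl
      (fun (st : List (List String) × List String) kv =>
        let row := st.2 ++ [kv.2]
        if (row.length : Int) = m then (st.1 ++ [row], []) else (st.1, row))
      ([], []) = (bd.map Prod.snd).foldl (pvStep m) ([], []) := by
    rw [List.foldl_map]
    rfl
  set vals := bd.map Prod.snd with hv
  by_cases hm : m ≤ 0
  · rw [if_pos hm]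
    simp only [hfold]
    rw [pvFoldl_noflush hm vals [] []]
    by_cases hvnil : vals = []
    · simp [hvnil]
    · simp [hvnil]
  · rw [if_neg hm]
    push Not at hm
    have hc : m = ((m.toNat - 1 : Nat) : Int) + 1 := by omega
    have : pvFinish (vals.foldl (pvStep m) ([], [])) = pvChunks (m.toNat - 1) ([] ++ vals) := by
      rw [hc]
      exact (pvFoldl_chunks vals [] [] (by simp)).trans (by simp)
    simp only [List.nil_append] at this
    rw [pvAlt_pos vals hm]
    simp only [hfold]
    rw [← this]
    rfl
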